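-- pv_equiv track=rewrite | github.com/sarbeshtiwari/arc-agi-3 | environment_files/vx01/vx01.py | _make_arrow_down
-- ===== SOURCE A (Python) =====
-- C_FLOOR         = 5
--
-- C_KEYCARD_C     = 7
--
-- def _make_arrow_down(T):
--     if T == 1:
--         return [[C_KEYCARD_C]]
--     if T == 2:
--         return [[C_FLOOR, C_FLOOR], [C_KEYCARD_C, C_FLOOR]]
--     if T == 3:
--         return [
--             [C_FLOOR, C_FLOOR, C_FLOOR],
--             [C_KEYCARD_C, C_FLOOR, C_KEYCARD_C],
--             [C_FLOOR, C_KEYCARD_C, C_FLOOR],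
--         ]
--     mid = T // 2
--     rows = []
--     for r in range(T):
--         row = [C_FLOOR] * T
--         if r == T - 1:
--             row[mid] = C_KEYCARD_C
--         elif r > 0:
--             spread = min(T - 1 - r, mid)
--             left = max(0, mid - spread)
--             right = min(T - 1, mid + spread)
--             row[left] = C_KEYCARD_C
--             row[right] = C_KEYCARD_C
--         rows.append(row)
--     return rows
-- ===== SOURCE B (Python) =====
-- C_FLOOR = 5
-- C_KEYCARD_C = 7
--
-- def _make_arrow_down(T):
--     if T == 2:
--         return [[C_FLOOR, C_FLOOR], [C_KEYCARD_C, C_FLOOR]]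
--     mid = T // 2
--     # phase 1: walk the two diagonal pointers up from the tip, recording strokes
--     marks = {}
--     if T >= 1:
--         marks[T - 1] = [mid]
--     cl = cr = mid
--     for r in range(T - 2, 0, -1):
--         cl = max(cl - 1, 0)
--         cr = min(cr + 1, T - 1)
--         marks[r] = [cl, cr]
--     # phase 2: paint the recorded strokes onto a floor canvas
--     rows = []
--     for r in range(T):
--         row = [C_FLOOR] * T
--         for c in marks.get(r, []):
--             row[c] = C_KEYCARD_C
--         rows.append(row)
--     return rows
-- ===== Notes on version B (the rewrite author's own statement) =====
-- stated objective: alternative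
-- what changed: A computes each row independently from a closed spread/left/right formula and assigns into a prefilled row; B instead walks two clamped diagonal pointers up from the arrow tip, recording each row's stroke columns in a dict in one incremental pass, and then paints the recorded strokes onto a floor canvas.
import Mathlib
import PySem

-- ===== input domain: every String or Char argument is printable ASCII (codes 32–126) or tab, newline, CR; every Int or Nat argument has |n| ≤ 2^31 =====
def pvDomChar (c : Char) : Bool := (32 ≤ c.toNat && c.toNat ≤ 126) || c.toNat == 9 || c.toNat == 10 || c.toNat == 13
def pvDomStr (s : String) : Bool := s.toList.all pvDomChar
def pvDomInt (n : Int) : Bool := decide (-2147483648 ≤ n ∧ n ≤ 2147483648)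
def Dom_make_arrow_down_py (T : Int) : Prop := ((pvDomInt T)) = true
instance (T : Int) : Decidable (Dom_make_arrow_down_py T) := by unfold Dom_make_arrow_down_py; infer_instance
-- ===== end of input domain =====

-- B replaces A's per-row spread/left/right formula by a bottom-up two-pointer walk from the tip
-- that records each row's stroke columns in a dict, then paints the recorded strokes onto a floor
-- canvas (alternative algorithm); return values agree everywhere.

-- ===== PORT A =====
-- the loop body of A: build a floor row, then assign the keycard cells by index
def pvRowA (T mid r : Int) : List Int :=
  let row := PySem.List.pyRepeat [(5 : Int)] T
  if r = T - 1 then PySem.List.pySetD row mid 7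
  else if r > 0 then
    let spread := min (T - 1 - r) mid
    let left := max 0 (mid - spread)
    let right := min (T - 1) (mid + spread)
    PySem.List.pySetD (PySem.List.pySetD row left 7) right 7
  else row

def make_arrow_down_py (T : Int) : List (List Int) :=
  if T = 1 then [[7]]
  else if T = 2 then [[5, 5], [7, 5]]
  else if T = 3 then [[5, 5, 5], [7, 5, 7], [5, 7, 5]]
  else
    let mid := PySem.Int.floordiv T 2
    (PySem.List.pyRange 0 T 1).foldl (fun rows r => rows ++ [pvRowA T mid r]) []

-- ===== PORT B =====
-- one step of Source B's walk: advance the clamped diagonal pointers and record the stroke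
def pvStepB (T : Int) (st : Int × Int × PySem.Dict Int (List Int)) (r : Int) :
    Int × Int × PySem.Dict Int (List Int) :=
  let cl := max (st.1 - 1) 0
  let cr := min (st.2.1 + 1) (T - 1)
  (cl, cr, st.2.2.insert r [cl, cr])

-- Source B phase 1: the tip, then the walk over rows T-2 .. 1
def pvMarksB (T mid : Int) : PySem.Dict Int (List Int) :=
  ((PySem.List.pyRange (T - 2) 0 (-1)).foldl (pvStepB T)
    (mid, mid, if 1 ≤ T then PySem.Dict.empty.insert (T - 1) [mid]
      else PySem.Dict.empty)).2.2

-- Source B phase 2: paint one row's recorded strokes onto a floor row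
def pvPaintB (T : Int) (marks : PySem.Dict Int (List Int)) (r : Int) : List Int :=
  (marks.getD r []).foldl (fun row c => PySem.List.pySetD row c 7)
    (PySem.List.pyRepeat [(5 : Int)] T)

def make_arrow_down_py_alt (T : Int) : List (List Int) :=
  if T = 2 then [[5, 5], [7, 5]]
  else
    let mid := PySem.Int.floordiv T 2
    let marks := pvMarksB T mid
    (PySem.List.pyRange 0 T 1).foldl (fun rows r => rows ++ [pvPaintB T marks r]) []

-- ===== PRECONDITION & SPEC =====
def Spec_make_arrow_down_py (T : Int) (out : List (List Int)) : Prop := out = make_arrow_down_py_alt T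
instance (T : Int) (out : List (List Int)) : Decidable (Spec_make_arrow_down_py T out) := by unfold Spec_make_arrow_down_py; infer_instance

-- ===== CLAIM (what is proved, stated in full; the proofs are below) =====
def Claim_equal_make_arrow_down_py : Prop := ∀ (T : Int), Dom_make_arrow_down_py T → Spec_make_arrow_down_py T (make_arrow_down_py T)

-- ===== LEMMAS AND PROOFS =====

-- countdown range grows at the low end: range(a, b-1, -1) = range(a, b, -1) ++ [b]
theorem pv_range_snoc (a b : Int) (h : b ≤ a) :
    PySem.List.pyRange a (b - 1) (-1) = PySem.List.pyRange a b (-1) ++ [b] := by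
  rw [PySem.List.pyRange_neg_one_eq_reverse, PySem.List.pyRange_neg_one_eq_reverse,
    show b - 1 + 1 = b by ring, PySem.List.pyRange_one_cons (by omega : b < a + 1)]
  simp

-- loop invariant of Source B's walk after k steps (rows T-2 .. T-1-k recorded):
-- the pointer values and every row's recorded stroke list
theorem pv_inv (T mid : Int) (hmid : 0 ≤ mid ∧ mid ≤ T - 1) (k : Nat)
    (hk : (k : Int) ≤ T - 2) :
    ((PySem.List.pyRange (T - 2) (T - 2 - k) (-1)).foldl (pvStepB T)
      (mid, mid, PySem.Dict.empty.insert (T - 1) [mid])).1 = max (mid - k) 0 ∧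
    ((PySem.List.pyRange (T - 2) (T - 2 - k) (-1)).foldl (pvStepB T)
      (mid, mid, PySem.Dict.empty.insert (T - 1) [mid])).2.1 = min (mid + k) (T - 1) ∧
    ∀ r : Int,
      (((PySem.List.pyRange (T - 2) (T - 2 - k) (-1)).foldl (pvStepB T)
        (mid, mid, PySem.Dict.empty.insert (T - 1) [mid])).2.2).getD r [] =
      if r = T - 1 then [mid]
      else if T - 2 - k < r ∧ r ≤ T - 2 then
        [max (mid - (T - 1 - r)) 0, min (mid + (T - 1 - r)) (T - 1)]
      else [] := by
  induction k with
  | zero =>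
      rw [show T - 2 - (0 : Nat) = T - 2 by push_cast; ring,
        PySem.List.pyRange_neg_one_eq_nil le_rfl]
      refine ⟨by simp; omega, by simp; omega, fun r => ?_⟩
      simp only [List.foldl_nil]
      rw [PySem.Dict.getD_insert]
      split_ifs <;> first | rfl | omega
  | succ k ih =>
      have hk' : (k : Int) ≤ T - 2 := by push_cast at hk ⊢; omega
      have hsnoc : PySem.List.pyRange (T - 2) (T - 2 - (k + 1 : Nat)) (-1)
          = PySem.List.pyRange (T - 2) (T - 2 - k) (-1) ++ [T - 2 - k] := by
        rw [show T - 2 - ((k : Nat) + 1 : Nat) = (T - 2 - k) - 1 by push_cast; ring]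
        exact pv_range_snoc _ _ (by omega)
      obtain ⟨ih1, ih2, ih3⟩ := ih hk'
      rw [hsnoc, List.foldl_append]
      refine ⟨?_, ?_, fun r => ?_⟩
      · simp only [List.foldl_cons, List.foldl_nil, pvStepB, ih1]
        push_cast; omega
      · simp only [List.foldl_cons, List.foldl_nil, pvStepB, ih1, ih2]
        push_cast; omega
      · simp only [List.foldl_cons, List.foldl_nil, pvStepB, ih1, ih2]
        rw [PySem.Dict.getD_insert]
        by_cases hr : r = T - 2 - k
        · rw [if_pos hr, if_neg (by push_cast at hk; omega),
            if_pos (by push_cast at hk; omega),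
            show max (max (mid - (k : Int)) 0 - 1) 0 = max (mid - (T - 1 - r)) 0 by
              push_cast at hk; omega,
            show min (min (mid + (k : Int)) (T - 1) + 1) (T - 1)
                = min (mid + (T - 1 - r)) (T - 1) by push_cast at hk; omega]
        · rw [if_neg hr, ih3 r]
          split_ifs <;> first | rfl | (push_cast at *; omega)

-- B's painted row equals A's row, for 4 ≤ T and any 0 ≤ r < T
theorem pv_row_eq (T mid : Int) (hT : 4 ≤ T) (hmid : mid = T / 2)
    (r : Int) (_hr0 : 0 ≤ r) (hrT : r < T) :
    pvPaintB T (pvMarksB T mid) r = pvRowA T mid r := by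
  have h2m : T - 1 ≤ 2 * mid := by omega
  have hgd := (pv_inv T mid ⟨by omega, by omega⟩ (T - 2).toNat (by omega)).2.2 r
  rw [show T - 2 - ((T - 2).toNat : Int) = 0 by omega] at hgd
  simp only [pvPaintB, pvMarksB]
  rw [if_pos (by omega : (1 : Int) ≤ T), hgd]
  simp only [pvRowA]
  by_cases hA : r = T - 1
  · rw [if_pos hA, if_pos hA]
    simp [List.foldl]
  · by_cases hB : r > 0
    · rw [if_neg hA, if_pos (by omega : 0 < r ∧ r ≤ T - 2), if_neg hA, if_pos hB]
      simp only [List.foldl_cons, List.foldl_nil]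
      rw [show max (mid - (T - 1 - r)) 0 = max 0 (mid - min (T - 1 - r) mid) by omega,
        show min (mid + (T - 1 - r)) (T - 1) = min (T - 1) (mid + min (T - 1 - r) mid) by
          omega]
    · rw [if_neg hA, if_neg (by omega : ¬(0 < r ∧ r ≤ T - 2)), if_neg hA,
        if_neg hB]
      simp [List.foldl]

theorem make_arrow_down_py_eq_alt (T : Int) :
    make_arrow_down_py T = make_arrow_down_py_alt T := by
  by_cases h1 : T = 1
  · subst h1; decide
  by_cases h2 : T = 2
  · subst h2; decide
  by_cases h3 : T = 3
  · subst h3; decide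
  by_cases h0 : T ≤ 0
  · simp [make_arrow_down_py, make_arrow_down_py_alt, h1, h2, h3,
      PySem.List.pyRange_one_eq_nil h0]
  · have hT : 4 ≤ T := by omega
    have hmid : PySem.Int.floordiv T 2 = T / 2 :=
      PySem.Int.floordiv_eq_ediv_of_pos (by norm_num)
    simp only [make_arrow_down_py, make_arrow_down_py_alt, if_neg h1, if_neg h2, if_neg h3]
    rw [PySem.List.foldl_append_singleton_eq_map, PySem.List.foldl_append_singleton_eq_map]
    simp only [List.nil_append]
    apply List.map_congr_left
    intro r hr
    rw [PySem.List.mem_pyRange_one] at hr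
    exact (pv_row_eq T (PySem.Int.floordiv T 2) hT (by rw [hmid]) r hr.1 hr.2).symm

-- ===== VERDICT (by name: the statement is the Claim_ definition above) =====
theorem make_arrow_down_py_spec : Claim_equal_make_arrow_down_py := by
  intro T _
  exact make_arrow_down_py_eq_alt T
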